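-- pv_equiv track=rewrite | github.com/samarth1107/K_Map | Kmap.py | checkremaining
-- ===== SOURCE A (Python) =====
-- def makeunique(numberlist):
--         requiredlist=[]
--         for number in numberlist:
--                 if number not in requiredlist:
--                         requiredlist.append(number)
--         return requiredlist
--
-- def checkremaining(numVar,Num1,Num2):
--         newlist=[]
--         newlist1=[]
--         newlist2=[]
--         Requiredlist=[]
--
--         #it checks for number which are left without tick as in petrick method
--         for outter in Num1:
--                 no=0
--                 for no in range(0,len(outter)):
--                         newlist1.append(outter[no])
--         newlist1=makeunique(newlist1)
--
--         for inner in Num2: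
--                 no=0
--                 for no in range(0,len(inner)):
--                         newlist2.append(inner[no])
--         newlist2=makeunique(newlist2)
--
--         for bits in newlist1:
--                 if bits not in newlist2:
--                         newlist.append(bits)
--
--         for num in newlist:
--                 for loop in Num1:
--                         if num in loop:
--                                 Requiredlist.append(loop)
--         Requiredlist=makeunique(Requiredlist)
--         return Requiredlist
-- ===== SOURCE B (Python) =====
-- def checkremaining(numVar, Num1, Num2):
--         # Faster bucket (counting-sort style) approach: rank each absent bit by first
--         # appearance, place each loop once into the bucket of its smallest-ranked
--         # absent bit, then concatenate the buckets.
--         bits2 = set()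
--         for inner in Num2:
--                 bits2.update(inner)
--         rank = {}
--         for loop in Num1:
--                 for b in loop:
--                         if b not in bits2 and b not in rank:
--                                 rank[b] = len(rank)
--         buckets = [[] for _ in range(len(rank))]
--         for loop in Num1:
--                 ks = [rank[b] for b in loop if b in rank]
--                 if ks:
--                         k = min(ks)
--                         if loop not in buckets[k]:
--                                 buckets[k].append(loop)
--         out = []
--         for bucket in buckets:
--                 out += bucket
--         return out
-- ===== Notes on version B (the rewrite author's own statement) =====
-- stated objective: faster
-- what changed: Replaces A's flatten-and-dedup passes and its 'for each absent bit, rescan all of Num1, then dedup the collected list at the end' cross pass with a bucket (counting-sort style) scheme: build the set of Num2's bits once, rank each absent bit by first appearance in one pass, place each loop once into the bucket of its smallest-ranked absent bit in a single pass over Num1, and concatenate the buckets.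
import Mathlib
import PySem

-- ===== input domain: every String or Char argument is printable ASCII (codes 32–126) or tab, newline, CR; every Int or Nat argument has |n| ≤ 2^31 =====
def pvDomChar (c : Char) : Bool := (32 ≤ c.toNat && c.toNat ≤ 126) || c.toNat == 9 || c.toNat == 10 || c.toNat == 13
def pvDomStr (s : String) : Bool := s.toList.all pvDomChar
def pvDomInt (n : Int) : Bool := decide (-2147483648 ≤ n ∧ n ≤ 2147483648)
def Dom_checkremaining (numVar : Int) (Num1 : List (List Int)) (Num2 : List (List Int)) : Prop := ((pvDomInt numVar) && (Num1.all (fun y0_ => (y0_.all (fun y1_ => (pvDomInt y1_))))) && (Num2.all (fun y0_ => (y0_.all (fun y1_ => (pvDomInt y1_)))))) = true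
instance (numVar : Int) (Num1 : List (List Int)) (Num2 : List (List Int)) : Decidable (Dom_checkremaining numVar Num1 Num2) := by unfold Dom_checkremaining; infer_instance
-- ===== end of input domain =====

-- B replaces A's absent-bit-by-loop rescanning cross pass (plus a final quadratic dedup) with a
-- single bucket-placing pass over Num1 keyed by each loop's smallest-ranked absent bit (measured faster).
-- ===== PORT A =====
def makeunique (numberlist : List Int) : List Int :=
  numberlist.foldl (fun requiredlist number =>
    if number ∈ requiredlist then requiredlist else requiredlist ++ [number]) []

def makeuniqueL (numberlist : List (List Int)) : List (List Int) :=
  numberlist.foldl (fun requiredlist number =>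
    if number ∈ requiredlist then requiredlist else requiredlist ++ [number]) []

def checkremaining (numVar : Int) (Num1 : List (List Int)) (Num2 : List (List Int)) : List (List Int) :=
  let newlist1 := Num1.foldl (fun acc outter =>
    (PySem.List.pyRange 0 outter.length 1).foldl (fun acc no => acc ++ [PySem.List.pyGetD outter no 0]) acc) []
  let newlist1 := makeunique newlist1
  let newlist2 := Num2.foldl (fun acc inner =>
    (PySem.List.pyRange 0 inner.length 1).foldl (fun acc no => acc ++ [PySem.List.pyGetD inner no 0]) acc) []
  let newlist2 := makeunique newlist2
  let newlist := newlist1.foldl (fun acc bits => if bits ∈ newlist2 then acc else acc ++ [bits]) []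
  let Requiredlist := newlist.foldl (fun acc num =>
    Num1.foldl (fun acc loop => if num ∈ loop then acc ++ [loop] else acc) acc) []
  makeuniqueL Requiredlist

-- ===== PORT B =====
def checkremaining_alt (numVar : Int) (Num1 : List (List Int)) (Num2 : List (List Int)) : List (List Int) :=
  let bits2 : PySem.Set Int := Num2.foldl (fun s inner => PySem.Set.update s inner) PySem.Set.empty
  let rank : PySem.Dict Int Int := Num1.foldl (fun r loop =>
    loop.foldl (fun r b =>
      if ¬ PySem.Set.contains bits2 b ∧ r.contains b = false then r.insert b (r.size : Int) else r) r)
    PySem.Dict.empty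
  let buckets : List (List (List Int)) := List.replicate rank.size []
  let buckets := Num1.foldl (fun bks loop =>
    let ks := (loop.filter (fun b => rank.contains b)).map (fun b => rank.getD b 0)
    if ks.isEmpty then bks
    else
      -- Python's min(ks) is guarded by 'if ks:'; getD 0 is unreachable (totality only)
      let k := (PySem.List.min? ks (fun x => x)).getD 0
      if loop ∈ PySem.List.pyGetD bks k [] then bks
      else PySem.List.pySetD bks k (PySem.List.pyGetD bks k [] ++ [loop])) buckets
  buckets.foldl (fun out bucket => out ++ bucket) []

-- ===== PRECONDITION & SPEC =====
def Spec_checkremaining (numVar : Int) (Num1 : List (List Int)) (Num2 : List (List Int)) (out : List (List Int)) : Prop := out = checkremaining_alt numVar Num1 Num2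
instance (numVar : Int) (Num1 : List (List Int)) (Num2 : List (List Int)) (out : List (List Int)) : Decidable (Spec_checkremaining numVar Num1 Num2 out) := by unfold Spec_checkremaining; infer_instance

-- ===== CLAIM (what is proved, stated in full; the proofs are below) =====
def Claim_equal_checkremaining : Prop := ∀ (numVar : Int) (Num1 : List (List Int)) (Num2 : List (List Int)), Dom_checkremaining numVar Num1 Num2 → Spec_checkremaining numVar Num1 Num2 (checkremaining numVar Num1 Num2)

-- ===== LEMMAS AND PROOFS =====

-- "make unique" fold, from an arbitrary accumulator
def muF {α : Type} [DecidableEq α] (acc xs : List α) : List α :=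
  xs.foldl (fun req n => if n ∈ req then req else req ++ [n]) acc

-- rank (position in bs) of the first bit of bs occurring in L; bs.length if none
def keyOf (bs : List Int) (L : List Int) : Nat := bs.findIdx (fun b => decide (b ∈ L))

-- canonical middle form: buckets by key, concatenated
def canon (bs : List Int) (N : List (List Int)) : List (List Int) :=
  (List.range bs.length).flatMap (fun i => muF [] (N.filter (fun L => decide (keyOf bs L = i))))

-- the ordered list of "absent" bits
def absentOf (N1 N2 : List (List Int)) : List Int :=
  (muF [] N1.flatten).filter (fun b => decide (b ∉ N2.flatten))

theorem muF_cons {α : Type} [DecidableEq α] (acc : List α) (x : α) (xs : List α) :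
    muF acc (x :: xs) = muF (if x ∈ acc then acc else acc ++ [x]) xs := rfl

theorem mem_muF {α : Type} [DecidableEq α] (xs : List α) (acc : List α) (x : α) :
    x ∈ muF acc xs ↔ x ∈ acc ∨ x ∈ xs := by
  induction xs generalizing acc with
  | nil => simp [muF]
  | cons y ys ih =>
    show x ∈ muF (if y ∈ acc then acc else acc ++ [y]) ys ↔ _
    by_cases hy : y ∈ acc
    · rw [if_pos hy, ih]
      constructor
      · rintro (h | h)
        · exact Or.inl h
        · exact Or.inr (List.mem_cons_of_mem _ h)
      · rintro (h | h)
        · exact Or.inl h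
        · rcases List.mem_cons.1 h with rfl | h
          · exact Or.inl hy
          · exact Or.inr h
    · rw [if_neg hy, ih]
      simp [List.mem_append, List.mem_cons]
      tauto

theorem muF_append {α : Type} [DecidableEq α] (acc xs ys : List α) :
    muF acc (xs ++ ys) = muF (muF acc xs) ys := by
  simp [muF, List.foldl_append]

theorem nodup_muF {α : Type} [DecidableEq α] (xs acc : List α) (h : acc.Nodup) :
    (muF acc xs).Nodup := by
  induction xs generalizing acc with
  | nil => exact h
  | cons y ys ih =>
    show (muF (if y ∈ acc then acc else acc ++ [y]) ys).Nodup
    by_cases hy : y ∈ acc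
    · rw [if_pos hy]; exact ih acc h
    · rw [if_neg hy]
      exact ih _ (by
        rw [List.nodup_append]
        refine ⟨h, List.nodup_singleton y, ?_⟩
        intro a ha b hb
        simp only [List.mem_singleton] at hb
        subst hb
        exact fun he => hy (he ▸ ha))

theorem muF_out {α : Type} [DecidableEq α] (p : List α) (xs q : List α) :
    muF (p ++ q) xs = p ++ muF q (xs.filter (fun x => decide (x ∉ p))) := by
  induction xs generalizing q with
  | nil => simp [muF]
  | cons y ys ih =>
    show muF (if y ∈ p ++ q then p ++ q else (p ++ q) ++ [y]) ys = _
    by_cases hp : y ∈ p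
    · rw [if_pos (List.mem_append.2 (Or.inl hp))]
      have : (y :: ys).filter (fun x => decide (x ∉ p)) = ys.filter (fun x => decide (x ∉ p)) := by
        simp [hp]
      rw [this, ih]
    · have hfil : (y :: ys).filter (fun x => decide (x ∉ p)) = y :: ys.filter (fun x => decide (x ∉ p)) := by
        simp [hp]
      by_cases hq : y ∈ q
      · rw [if_pos (List.mem_append.2 (Or.inr hq)), hfil]
        have : muF q (y :: ys.filter (fun x => decide (x ∉ p)))
            = muF q (ys.filter (fun x => decide (x ∉ p))) := by
          show muF (if y ∈ q then q else q ++ [y]) _ = _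
          rw [if_pos hq]
        rw [this, ih]
      · rw [if_neg (by simp [hp, hq]), hfil]
        have : muF q (y :: ys.filter (fun x => decide (x ∉ p)))
            = muF (q ++ [y]) (ys.filter (fun x => decide (x ∉ p))) := by
          show muF (if y ∈ q then q else q ++ [y]) _ = _
          rw [if_neg hq]
        rw [this, List.append_assoc, ih (q ++ [y])]

theorem muF_skip {α : Type} [DecidableEq α] (xs p : List α) :
    muF p xs = p ++ muF [] (xs.filter (fun x => decide (x ∉ p))) := by
  have := muF_out p xs []
  simpa using this

theorem nodup_snoc {α : Type} (L : List α) (b : α) (h : L.Nodup) (hb : b ∉ L) :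
    (L ++ [b]).Nodup := by
  rw [List.nodup_append]
  refine ⟨h, List.nodup_singleton b, ?_⟩
  intro a ha b' hb'
  simp only [List.mem_singleton] at hb'
  subst hb'
  exact fun he => hb (he ▸ ha)

theorem filter_flatMap' {α β : Type} (l : List α) (g : α → List β) (p : β → Bool) :
    (l.flatMap g).filter p = l.flatMap (fun x => (g x).filter p) := by
  induction l with
  | nil => rfl
  | cons x l ih => simp [List.flatMap_cons, List.filter_append, ih]

theorem keyOf_cons (b : Int) (bs : List Int) (L : List Int) :
    keyOf (b :: bs) L = if b ∈ L then 0 else keyOf bs L + 1 := by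
  by_cases h : b ∈ L <;> simp [keyOf, List.findIdx_cons, h]

theorem canon_eq (bs : List Int) (N : List (List Int)) :
    muF [] (bs.flatMap (fun b => N.filter (fun L => decide (b ∈ L)))) = canon bs N := by
  induction bs generalizing N with
  | nil => simp [canon, muF]
  | cons b bs ih =>
    have hmem : ∀ L, L ∈ muF ([] : List (List Int)) (N.filter (fun M => decide (b ∈ M)))
        ↔ (L ∈ N ∧ b ∈ L) := by
      intro L; rw [mem_muF]; simp
    have h1 : muF [] ((b :: bs).flatMap (fun b' => N.filter (fun L => decide (b' ∈ L))))
        = muF [] (N.filter (fun L => decide (b ∈ L)))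
          ++ muF [] ((bs.flatMap (fun b' => N.filter (fun L => decide (b' ∈ L)))).filter
              (fun L => decide (L ∉ muF ([] : List (List Int)) (N.filter (fun M => decide (b ∈ M)))))) := by
      rw [List.flatMap_cons, muF_append, muF_skip]
      congr 1
      exact congrArg (muF []) (List.filter_congr (fun x _ => decide_eq_decide.2 Iff.rfl))
    have hpw : ∀ b' : Int,
        (N.filter (fun L => decide (b' ∈ L))).filter
            (fun L => decide (L ∉ muF ([] : List (List Int)) (N.filter (fun M => decide (b ∈ M)))))
        = (N.filter (fun L => decide (b ∉ L))).filter (fun L => decide (b' ∈ L)) := by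
      intro b'
      rw [List.filter_filter, List.filter_filter]
      apply List.filter_congr
      intro L hL
      have : (L ∉ muF ([] : List (List Int)) (N.filter (fun M => decide (b ∈ M)))) ↔ b ∉ L := by
        rw [hmem L]; simp [hL]
      simp only [decide_eq_decide.2 this, Bool.and_comm]
    have h2 : (bs.flatMap (fun b' => N.filter (fun L => decide (b' ∈ L)))).filter
          (fun L => decide (L ∉ muF ([] : List (List Int)) (N.filter (fun M => decide (b ∈ M)))))
        = bs.flatMap (fun b' => ((N.filter (fun L => decide (b ∉ L))).filter (fun L => decide (b' ∈ L)))) := by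
      rw [filter_flatMap']
      exact congrArg (fun f => List.flatMap f bs) (funext hpw)
    have hF0 : N.filter (fun L => decide (keyOf (b :: bs) L = 0)) = N.filter (fun L => decide (b ∈ L)) := by
      apply List.filter_congr
      intro L _
      by_cases h : b ∈ L <;> simp [keyOf_cons, h]
    have hFS : ∀ i : Nat, N.filter (fun L => decide (keyOf (b :: bs) L = i + 1))
        = (N.filter (fun L => decide (b ∉ L))).filter (fun L => decide (keyOf bs L = i)) := by
      intro i
      rw [List.filter_filter]
      apply List.filter_congr
      intro L _
      by_cases h : b ∈ L <;> simp [keyOf_cons, h]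
    have h3 : canon (b :: bs) N
        = muF [] (N.filter (fun L => decide (b ∈ L)))
          ++ canon bs (N.filter (fun L => decide (b ∉ L))) := by
      show (List.range (bs.length + 1)).flatMap _ = _
      rw [List.range_succ_eq_map, List.flatMap_cons, hF0]
      congr 1
      rw [List.flatMap_map]
      show _ = (List.range bs.length).flatMap
        (fun i => muF [] ((N.filter (fun L => decide (b ∉ L))).filter (fun L => decide (keyOf bs L = i))))
      exact congrArg (fun f => List.flatMap f (List.range bs.length))
        (funext fun i => congrArg (muF []) (hFS i))
    rw [h1, h2, ih, h3]

theorem flattenA (Ns : List (List Int)) :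
    Ns.foldl (fun acc outter =>
      (PySem.List.pyRange 0 (outter.length : Int) 1).foldl
        (fun acc no => acc ++ [PySem.List.pyGetD outter no 0]) acc) [] = Ns.flatten := by
  have hin : ∀ (acc : List Int) (outter : List Int),
      (PySem.List.pyRange 0 (outter.length : Int) 1).foldl
        (fun acc no => acc ++ [PySem.List.pyGetD outter no 0]) acc = acc ++ outter := by
    intro acc outter
    rw [PySem.List.foldl_pyRange_zero_pyGetD' outter 0 (fun a x => a ++ [x]) acc]
    exact PySem.List.foldl_append_singleton_eq_self _ _
  rw [PySem.List.foldl_congr_mem Ns _ (fun acc x => acc ++ x) [] (fun acc x _ => hin acc x)]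
  simpa using PySem.List.foldl_append_eq_flatten Ns []

theorem newlistA (l1 l2 : List Int) :
    l1.foldl (fun acc bits => if bits ∈ l2 then acc else acc ++ [bits]) []
      = l1.filter (fun b => decide (b ∉ l2)) := by
  have hstep : ∀ (acc : List Int), ∀ bits ∈ l1,
      (if bits ∈ l2 then acc else acc ++ [bits]) = (if bits ∉ l2 then acc ++ [bits] else acc) := by
    intro acc bits _
    by_cases h : bits ∈ l2 <;> simp [h]
  rw [PySem.List.foldl_congr_mem l1 _ _ [] hstep]
  simpa using PySem.List.foldl_append_ite_eq_filter (fun b => b ∉ l2) l1 []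

theorem requiredA (newlist : List Int) (N1 : List (List Int)) :
    newlist.foldl (fun acc num =>
        N1.foldl (fun acc loop => if num ∈ loop then acc ++ [loop] else acc) acc) []
      = newlist.flatMap (fun num => N1.filter (fun L => decide (num ∈ L))) := by
  have hin : ∀ (acc : List (List Int)), ∀ num ∈ newlist,
      N1.foldl (fun acc loop => if num ∈ loop then acc ++ [loop] else acc) acc
        = acc ++ N1.filter (fun L => decide (num ∈ L)) := by
    intro acc num _
    exact PySem.List.foldl_append_ite_eq_filter (fun L => num ∈ L) N1 acc
  rw [PySem.List.foldl_congr_mem newlist _ _ [] hin]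
  simpa using PySem.List.foldl_append_eq_flatMap
    (fun num => N1.filter (fun L => decide (num ∈ L))) newlist []

theorem A_eq_canon (numVar : Int) (Num1 Num2 : List (List Int)) :
    checkremaining numVar Num1 Num2 = canon (absentOf Num1 Num2) Num1 := by
  have hL : ∀ xs : List (List Int), makeuniqueL xs = muF [] xs := by
    intro xs
    unfold makeuniqueL muF
    exact PySem.List.foldl_congr_mem xs _ _ [] (fun acc x _ => by by_cases h : x ∈ acc <;> simp [h])
  have hI : ∀ xs : List Int, makeunique xs = muF [] xs := by
    intro xs
    unfold makeunique muF
    exact PySem.List.foldl_congr_mem xs _ _ [] (fun acc x _ => by by_cases h : x ∈ acc <;> simp [h])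
  show makeuniqueL _ = _
  simp only [hL, hI]
  rw [flattenA Num1, flattenA Num2, newlistA, requiredA]
  rw [show (muF [] Num1.flatten).filter (fun b => decide (b ∉ muF [] Num2.flatten))
        = absentOf Num1 Num2 from
    List.filter_congr (fun b _ => decide_eq_decide.2 (by rw [mem_muF]; simp))]
  exact canon_eq _ _

-- ===== B side =====

-- predicate "absent from Num2"
abbrev Pabs (N2 : List (List Int)) (b : Int) : Prop := b ∉ N2.flatten

-- incremental "dedup and filter" fold
def dfold (N2 : List (List Int)) (L : List Int) (xs : List Int) : List Int :=
  xs.foldl (fun ks b => if Pabs N2 b ∧ b ∉ ks then ks ++ [b] else ks) L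

-- the rank dict of an ordered key list
def mkD (L : List Int) : PySem.Dict Int Int :=
  PySem.Dict.mk (L.zipIdx.map (fun p => (p.1, (p.2 : Int))))

theorem dfold_eq_filter_muF (N2 : List (List Int)) (xs M : List Int) :
    dfold N2 (M.filter (fun x => decide (Pabs N2 x))) xs
      = (muF M xs).filter (fun x => decide (Pabs N2 x)) := by
  induction xs generalizing M with
  | nil => simp [dfold, muF]
  | cons b bs ih =>
    show dfold N2 (if Pabs N2 b ∧ b ∉ M.filter (fun x => decide (Pabs N2 x))
        then M.filter (fun x => decide (Pabs N2 x)) ++ [b]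
        else M.filter (fun x => decide (Pabs N2 x))) bs = _
    have hR : muF M (b :: bs) = muF (if b ∈ M then M else M ++ [b]) bs := rfl
    by_cases hP : Pabs N2 b
    · by_cases hM : b ∈ M
      · rw [if_neg (fun hc => hc.2 (List.mem_filter.2 ⟨hM, decide_eq_true hP⟩)), hR, if_pos hM]
        exact ih M
      · rw [if_pos ⟨hP, fun hc => hM (List.mem_filter.1 hc).1⟩, hR, if_neg hM]
        have hPe : ¬ ∃ l ∈ N2, b ∈ l := by simpa [Pabs, List.mem_flatten] using hP
        have : M.filter (fun x => decide (Pabs N2 x)) ++ [b]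
            = (M ++ [b]).filter (fun x => decide (Pabs N2 x)) := by
          simp [List.filter_append, hPe]
        rw [this]
        exact ih (M ++ [b])
    · rw [if_neg (fun hc => hP hc.1), hR]
      by_cases hM : b ∈ M
      · rw [if_pos hM]; exact ih M
      · rw [if_neg hM]
        have hPe : ∃ l ∈ N2, b ∈ l := by simpa [Pabs, List.mem_flatten] using hP
        have : M.filter (fun x => decide (Pabs N2 x))
            = (M ++ [b]).filter (fun x => decide (Pabs N2 x)) := by
          simp [List.filter_append, hPe]
        rw [this]
        exact ih (M ++ [b])

theorem mkD_keys (L : List Int) : (mkD L).keys = L := by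
  simp [mkD, PySem.Dict.keys, PySem.Dict.items, List.map_map, Function.comp_def]

theorem mkD_contains (L : List Int) (b : Int) : (mkD L).contains b = decide (b ∈ L) := by
  rw [PySem.Dict.contains_eq_decide_mem_keys, mkD_keys]

theorem mkD_size (L : List Int) : (mkD L).size = L.length := by
  simp [mkD, PySem.Dict.size, PySem.Dict.items]

theorem mkD_insert (L : List Int) (b : Int) (h : b ∉ L) :
    (mkD L).insert b ((mkD L).size : Int) = mkD (L ++ [b]) := by
  apply PySem.Dict.ext
  rw [PySem.Dict.items_insert_of_not_contains _ _ (by simp [mkD_contains, h])]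
  show (mkD L).items ++ [(b, ((mkD L).size : Int))] = _
  rw [mkD_size]
  simp [mkD, PySem.Dict.items, List.zipIdx_append]

theorem mkD_getD (L : List Int) (h : L.Nodup) (b : Int) (hb : b ∈ L) :
    (mkD L).getD b 0 = (L.idxOf b : Int) := by
  have hlt : L.idxOf b < L.length := List.idxOf_lt_length_of_mem hb
  have hz : (b, L.idxOf b) ∈ L.zipIdx := by
    rw [List.mk_mem_zipIdx_iff_getElem?]
    rw [List.getElem?_eq_getElem hlt, List.getElem_idxOf]
  have hm : (b, (L.idxOf b : Int)) ∈ (mkD L).items := by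
    simp only [mkD, PySem.Dict.items]
    exact List.mem_map.2 ⟨(b, L.idxOf b), hz, rfl⟩
  exact PySem.Dict.getD_of_mem_items _ hm (by rw [mkD_keys]; exact h) 0

theorem rank_items (N2 : List (List Int)) (xs : List Int) (L : List Int) (h : L.Nodup) :
    xs.foldl (fun r b => if Pabs N2 b ∧ r.contains b = false then r.insert b (r.size : Int) else r) (mkD L)
      = mkD (dfold N2 L xs) := by
  induction xs generalizing L with
  | nil => simp [dfold]
  | cons b bs ih =>
    simp only [List.foldl_cons]
    have hstep : dfold N2 L (b :: bs) = dfold N2 (if Pabs N2 b ∧ b ∉ L then L ++ [b] else L) bs := rfl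
    rw [hstep]
    have hcond : (Pabs N2 b ∧ (mkD L).contains b = false) ↔ (Pabs N2 b ∧ b ∉ L) := by
      simp [mkD_contains]
    by_cases hc : Pabs N2 b ∧ b ∉ L
    · rw [if_pos (hcond.2 hc), mkD_insert L b hc.2, if_pos hc]
      exact ih _ (nodup_snoc L b h hc.2)
    · rw [if_neg (fun hh => hc (hcond.1 hh)), if_neg hc]
      exact ih _ h

theorem bits2_eq (Num2 : List (List Int)) :
    Num2.foldl (fun s inner => PySem.Set.update s inner) PySem.Set.empty
      = PySem.Set.ofList Num2.flatten := by
  rw [PySem.Set.ofList_eq_foldl, List.foldl_flatten]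
  rfl

theorem contains_ofList (xs : List Int) (b : Int) :
    PySem.Set.contains (PySem.Set.ofList xs) b = decide (b ∈ xs) := by
  rw [show PySem.Set.contains (PySem.Set.ofList xs) b = List.contains (PySem.Set.ofList xs) b from rfl,
      List.contains_eq_mem]
  exact decide_eq_decide.2 (PySem.Set.mem_ofList xs b)

theorem rank_eq (Num1 Num2 : List (List Int)) :
    Num1.foldl (fun r loop => loop.foldl (fun r b =>
        if ¬ PySem.Set.contains (PySem.Set.ofList Num2.flatten) b ∧ r.contains b = false
        then r.insert b (r.size : Int) else r) r) PySem.Dict.empty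
      = mkD (absentOf Num1 Num2) := by
  rw [List.foldl_flatten.symm]
  have hfn : ∀ (r : PySem.Dict Int Int), ∀ b ∈ Num1.flatten,
      (if ¬ PySem.Set.contains (PySem.Set.ofList Num2.flatten) b ∧ r.contains b = false
        then r.insert b (r.size : Int) else r)
      = (if Pabs Num2 b ∧ r.contains b = false then r.insert b (r.size : Int) else r) := by
    intro r b _
    have : (¬ PySem.Set.contains (PySem.Set.ofList Num2.flatten) b ∧ r.contains b = false)
        ↔ (Pabs Num2 b ∧ r.contains b = false) := by
      rw [contains_ofList]
      unfold Pabs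
      simp
    by_cases hb : Pabs Num2 b ∧ r.contains b = false
    · rw [if_pos (this.2 hb), if_pos hb]
    · rw [if_neg (fun hh => hb (this.1 hh)), if_neg hb]
  rw [PySem.List.foldl_congr_mem Num1.flatten _ _ PySem.Dict.empty hfn]
  have hempty : (PySem.Dict.empty : PySem.Dict Int Int) = mkD [] := rfl
  rw [hempty, rank_items Num2 Num1.flatten [] List.nodup_nil]
  have hdf : dfold Num2 [] Num1.flatten
      = (muF [] Num1.flatten).filter (fun x => decide (Pabs Num2 x)) :=
    dfold_eq_filter_muF Num2 Num1.flatten []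
  rw [hdf]
  apply congrArg
  unfold absentOf
  exact List.filter_congr (fun b _ => decide_eq_decide.2 (by unfold Pabs; exact Iff.rfl))

-- the ks list of the B port, for rank = mkD bs
theorem ks_eq (bs : List Int) (hn : bs.Nodup) (L : List Int) :
    (L.filter (fun b => (mkD bs).contains b)).map (fun b => (mkD bs).getD b 0)
      = (L.filter (fun b => decide (b ∈ bs))).map (fun b => (bs.idxOf b : Int)) := by
  rw [show L.filter (fun b => (mkD bs).contains b) = L.filter (fun b => decide (b ∈ bs)) from
    List.filter_congr (fun b _ => mkD_contains bs b)]
  apply List.map_congr_left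
  intro b hb
  exact mkD_getD bs hn b (by simpa using (List.mem_filter.1 hb).2)

theorem ks_empty_iff (bs : List Int) (L : List Int) :
    ((L.filter (fun b => decide (b ∈ bs))).map (fun b => (bs.idxOf b : Int))).isEmpty = true
      ↔ ∀ b ∈ L, b ∉ bs := by
  rw [List.isEmpty_iff, List.map_eq_nil_iff, List.filter_eq_nil_iff]
  simp

theorem keyOf_lt (bs : List Int) (L : List Int) (h : ∃ b ∈ L, b ∈ bs) : keyOf bs L < bs.length := by
  rcases h with ⟨b, hbL, hbbs⟩
  exact List.findIdx_lt_length.2 ⟨b, hbbs, by simpa using hbL⟩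

theorem keyOf_eq_length (bs : List Int) (L : List Int) (h : ∀ b ∈ L, b ∉ bs) :
    keyOf bs L = bs.length := by
  rw [keyOf, List.findIdx_eq_length]
  intro b hb
  simp only [decide_eq_false_iff_not]
  intro hbL
  exact h b hbL hb

theorem min_ks (bs : List Int) (hn : bs.Nodup) (L : List Int) (h : ∃ b ∈ L, b ∈ bs) :
    PySem.List.min? ((L.filter (fun b => decide (b ∈ bs))).map (fun b => (bs.idxOf b : Int))) (fun x => x)
      = some ((keyOf bs L : Nat) : Int) := by
  set ks := (L.filter (fun b => decide (b ∈ bs))).map (fun b => (bs.idxOf b : Int)) with hks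
  have hkslt : keyOf bs L < bs.length := keyOf_lt bs L h
  have hbsmem : bs[keyOf bs L] ∈ L := by
    have := List.findIdx_getElem (p := fun b => decide (b ∈ L)) (xs := bs) (w := hkslt)
    simpa using this
  have hfmem : ((keyOf bs L : Nat) : Int) ∈ ks := by
    rw [hks]
    apply List.mem_map.2
    refine ⟨bs[keyOf bs L], List.mem_filter.2 ⟨hbsmem, by simp [List.getElem_mem]⟩, ?_⟩
    congr 1
    exact List.Nodup.idxOf_getElem hn _ _
  have hlow : ∀ x ∈ ks, ((keyOf bs L : Nat) : Int) ≤ x := by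
    intro x hx
    rw [hks] at hx
    rcases List.mem_map.1 hx with ⟨b, hbf, rfl⟩
    rcases List.mem_filter.1 hbf with ⟨hbL, hbbs⟩
    simp only [decide_eq_true_eq] at hbbs
    have hidx : bs.idxOf b < bs.length := List.idxOf_lt_length_of_mem hbbs
    have : keyOf bs L ≤ bs.idxOf b := by
      by_contra hlt
      rw [not_le] at hlt
      have hfalse := List.not_of_lt_findIdx (p := fun b => decide (b ∈ L)) (xs := bs) hlt
      simp only [decide_eq_false_iff_not] at hfalse
      apply hfalse
      have hgb : ∀ (h : List.idxOf b bs < bs.length), bs[List.idxOf b bs]'h = b :=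
        fun h => List.getElem_idxOf h
      rw [hgb]
      exact hbL
    exact_mod_cast this
  rcases hm : PySem.List.min? ks (fun x => x) with _ | m
  · rw [PySem.List.min?_eq_none_iff] at hm
    rw [hm] at hfmem
    exact absurd hfmem (List.not_mem_nil)
  · have hmm : m ∈ ks := PySem.List.min?_mem hm
    have h1 : m ≤ ((keyOf bs L : Nat) : Int) := PySem.List.min?_isMin hm _ hfmem
    have h2 : ((keyOf bs L : Nat) : Int) ≤ m := hlow m hmm
    rw [le_antisymm h1 h2]

-- one step of the bucket fold (B port, rank already rewritten)
def stepB (bs : List Int) (bks : List (List (List Int))) (L : List Int) : List (List (List Int)) :=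
  let ks := (L.filter (fun b => (mkD bs).contains b)).map (fun b => (mkD bs).getD b 0)
  if ks.isEmpty then bks
  else
    let k := (PySem.List.min? ks (fun x => x)).getD 0
    if L ∈ PySem.List.pyGetD bks k [] then bks
    else PySem.List.pySetD bks k (PySem.List.pyGetD bks k [] ++ [L])

theorem stepB_eq (bs : List Int) (hn : bs.Nodup) (bks : List (List (List Int)))
    (hlen : bks.length = bs.length) (L : List Int) :
    stepB bs bks L =
      if h : ∃ b ∈ L, b ∈ bs then
        (if L ∈ bks[keyOf bs L]'(hlen ▸ keyOf_lt bs L h) then bks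
         else bks.set (keyOf bs L) ((bks[keyOf bs L]'(hlen ▸ keyOf_lt bs L h)) ++ [L]))
      else bks := by
  simp only [stepB]
  rw [ks_eq bs hn L]
  by_cases h : ∃ b ∈ L, b ∈ bs
  · rw [dif_pos h]
    have hfe : ((L.filter (fun b => decide (b ∈ bs))).map (fun b => (bs.idxOf b : Int))).isEmpty = false := by
      rcases h with ⟨b, hbL, hbbs⟩
      rw [Bool.eq_false_iff]
      intro hemp
      exact ((ks_empty_iff bs L).1 hemp) b hbL hbbs
    rw [if_neg (by rw [hfe]; exact Bool.false_ne_true)]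
    rw [min_ks bs hn L h]
    have hflt : keyOf bs L < bks.length := hlen ▸ keyOf_lt bs L h
    simp only [Option.getD_some, PySem.List.pyGetD_natCast, PySem.List.pySetD_natCast]
    rw [List.getD_eq_getElem bks [] hflt]
  · rw [dif_neg h]
    have hall : ∀ b ∈ L, b ∉ bs := fun b hb hbs => h ⟨b, hb, hbs⟩
    rw [if_pos ((ks_empty_iff bs L).2 hall)]

theorem length_stepB (bs : List Int) (bks : List (List (List Int))) (L : List Int) :
    (stepB bs bks L).length = bks.length := by
  simp only [stepB]
  split_ifs <;> simp [PySem.List.length_pySetD]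

theorem length_foldB (bs : List Int) (N : List (List Int)) (bks : List (List (List Int))) :
    (N.foldl (stepB bs) bks).length = bks.length := by
  induction N generalizing bks with
  | nil => rfl
  | cons L N ih => rw [List.foldl_cons, ih, length_stepB]

theorem foldB_getElem (bs : List Int) (hn : bs.Nodup) (N : List (List Int))
    (i : Nat) (bks : List (List (List Int))) (hlen : bks.length = bs.length)
    (hi : i < bks.length) :
    (N.foldl (stepB bs) bks)[i]?
      = some (muF (bks[i]) (N.filter (fun L => decide (keyOf bs L = i)))) := by
  induction N generalizing bks with
  | nil => simp [muF, List.getElem?_eq_getElem hi]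
  | cons L N ih =>
    rw [List.foldl_cons, stepB_eq bs hn bks hlen L]
    by_cases hq : ∃ b ∈ L, b ∈ bs
    · rw [dif_pos hq]
      have hf : keyOf bs L < bks.length := hlen ▸ keyOf_lt bs L hq
      by_cases hmem : L ∈ bks[keyOf bs L]'hf
      · rw [if_pos hmem]
        rw [ih bks hlen hi]
        apply congrArg
        by_cases hik : keyOf bs L = i
        · subst hik
          rw [List.filter_cons_of_pos (by simp)]
          conv_rhs => rw [muF_cons, if_pos hmem]
        · rw [List.filter_cons_of_neg (by simp [hik])]
      · rw [if_neg hmem]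
        have hlen' : (bks.set (keyOf bs L) (bks[keyOf bs L]'hf ++ [L])).length = bs.length := by
          rw [List.length_set]; exact hlen
        have hi' : i < (bks.set (keyOf bs L) (bks[keyOf bs L]'hf ++ [L])).length := by
          rw [List.length_set]; exact hi
        rw [ih _ hlen' hi']
        apply congrArg
        by_cases hik : keyOf bs L = i
        · subst hik
          rw [List.filter_cons_of_pos (by simp)]
          have hset : (bks.set (keyOf bs L) (bks[keyOf bs L]'hf ++ [L]))[keyOf bs L]'hi'
              = bks[keyOf bs L]'hf ++ [L] := List.getElem_set_self _
          rw [hset]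
          conv_rhs => rw [muF_cons, if_neg hmem]
        · rw [List.filter_cons_of_neg (by simp [hik])]
          have hset : (bks.set (keyOf bs L) (bks[keyOf bs L]'hf ++ [L]))[i]'hi'
              = bks[i]'hi := List.getElem_set_ne hik _
          rw [hset]
    · rw [dif_neg hq]
      rw [ih bks hlen hi]
      apply congrArg
      have hkey : keyOf bs L = bs.length :=
        keyOf_eq_length bs L (fun b hb hbs => hq ⟨b, hb, hbs⟩)
      have hik : ¬ (keyOf bs L = i) := by
        rw [hkey]
        omega
      rw [List.filter_cons_of_neg (by simp [hik])]

theorem nodup_absentOf (N1 N2 : List (List Int)) : (absentOf N1 N2).Nodup := by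
  exact (nodup_muF N1.flatten [] List.nodup_nil).filter _

theorem B_eq_canon (numVar : Int) (Num1 Num2 : List (List Int)) :
    checkremaining_alt numVar Num1 Num2 = canon (absentOf Num1 Num2) Num1 := by
  have hn : (absentOf Num1 Num2).Nodup := nodup_absentOf Num1 Num2
  simp only [checkremaining_alt]
  rw [bits2_eq, rank_eq, mkD_size]
  show (Num1.foldl (stepB (absentOf Num1 Num2))
      (List.replicate (absentOf Num1 Num2).length [])).foldl (fun out bucket => out ++ bucket) []
    = canon (absentOf Num1 Num2) Num1
  have hlist : Num1.foldl (stepB (absentOf Num1 Num2)) (List.replicate (absentOf Num1 Num2).length [])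
      = (List.range (absentOf Num1 Num2).length).map
          (fun i => muF [] (Num1.filter (fun L => decide (keyOf (absentOf Num1 Num2) L = i)))) := by
    apply List.ext_getElem?
    intro i
    by_cases hi : i < (absentOf Num1 Num2).length
    · rw [foldB_getElem (absentOf Num1 Num2) hn Num1 i _ (by simp) (by simp [hi])]
      rw [List.getElem?_map, List.getElem?_range hi]
      simp [List.getElem_replicate]
    · rw [List.getElem?_eq_none (by rw [length_foldB, List.length_replicate]; omega),
          List.getElem?_eq_none (by rw [List.length_map, List.length_range]; omega)]
  rw [hlist]
  rw [show ((List.range (absentOf Num1 Num2).length).map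
        (fun i => muF [] (Num1.filter (fun L => decide (keyOf (absentOf Num1 Num2) L = i))))).foldl
          (fun out bucket => out ++ bucket) []
      = ((List.range (absentOf Num1 Num2).length).map
        (fun i => muF [] (Num1.filter (fun L => decide (keyOf (absentOf Num1 Num2) L = i))))).flatten from by
    simpa using PySem.List.foldl_append_eq_flatten _ []]
  rw [← List.flatMap_def]
  rfl

-- ===== VERDICT (by name: the statement is the Claim_ definition above) =====
theorem checkremaining_spec : Claim_equal_checkremaining := by
  intro numVar Num1 Num2 _
  unfold Spec_checkremaining
  rw [A_eq_canon, B_eq_canon]
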